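-- pv_equiv track=rewrite | github.com/ngc7023/TWE-DMM | TWE4/data_process.py | make_train_data_0
-- ===== SOURCE A (Python) =====
-- def make_train_data_0(train,length):
--     id_list=[0]*(length-1) # len(id_list)=29
--     for i in range(len(train)):
--         id_list+=train[i]
--     fea=[]
--     lab=[]
--     i=0
--
--     while i<len(id_list):
--         if i+length>=len(id_list):
--             fea.append(id_list[i:]+[0]*(length-len(id_list[i:])))
--             lab.append(0)
--         else:
--             fea.append(id_list[i:i+length])
--             lab.append(id_list[i+length])
--         i+=1
--     return fea,lab
-- ===== SOURCE B (Python) =====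
-- def make_train_data_0(train, length):
--     flat = [tok for sent in train for tok in sent]
--     padded = [0] * (length - 1) + flat + [0] * length
--     n = len(padded) - length
--     fea = [padded[i:i + length] for i in range(n)]
--     lab = padded[length:length + n]
--     return fea, lab
-- ===== Notes on version B (the rewrite author's own statement) =====
-- stated objective: simpler
-- what changed: Replaces the while loop with its boundary if/else by one pre-padded list (length trailing zeros) so windows come from a uniform comprehension and the whole label list is a single slice.
-- outside the precondition, e.g. on make_train_data_0([[1, 2, 3]], -1): A returns ([[1, 2], [], []], [3, 1, 2]), B returns ([[1, 2], [], [], []], [3])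
import Mathlib
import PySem

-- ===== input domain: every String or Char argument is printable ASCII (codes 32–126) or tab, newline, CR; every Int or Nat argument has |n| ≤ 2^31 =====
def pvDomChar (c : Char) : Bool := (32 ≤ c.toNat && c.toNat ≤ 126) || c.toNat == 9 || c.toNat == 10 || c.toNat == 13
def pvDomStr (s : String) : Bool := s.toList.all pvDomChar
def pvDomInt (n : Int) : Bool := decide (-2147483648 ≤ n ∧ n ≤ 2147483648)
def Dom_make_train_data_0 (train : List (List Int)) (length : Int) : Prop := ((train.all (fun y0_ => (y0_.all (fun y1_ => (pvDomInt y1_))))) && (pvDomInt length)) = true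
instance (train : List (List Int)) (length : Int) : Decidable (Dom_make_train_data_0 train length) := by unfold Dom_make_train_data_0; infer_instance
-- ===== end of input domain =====

-- B replaces A's boundary if/else while-loop by one pre-padded list (length trailing
-- zeros), a uniform window comprehension and a single slice for the labels (simpler).

-- ===== PORT A =====
-- the while loop: i counts up while i < len(id_list); fea/lab are the accumulators
def mtdA_loop (id_list : List Int) (length : Int) (i : Nat)
    (fea : List (List Int)) (lab : List Int) : List (List Int) × List Int :=
  if _h : i < id_list.length then
    if (i : Int) + length ≥ (id_list.length : Int) then
      mtdA_loop id_list length (i + 1)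
        (fea ++ [PySem.List.slice id_list (some (i : Int)) none
                 ++ List.replicate (length - ((PySem.List.slice id_list (some (i : Int)) none).length : Int)).toNat (0 : Int)])
        (lab ++ [0])
    else
      mtdA_loop id_list length (i + 1)
        (fea ++ [PySem.List.slice id_list (some (i : Int)) (some ((i : Int) + length))])
        (lab ++ [(PySem.List.pyGet? id_list ((i : Int) + length)).getD 0])
  else (fea, lab)
termination_by id_list.length - i

def make_train_data_0 (train : List (List Int)) (length : Int) : List (List Int) × List Int :=
  -- id_list = [0]*(length-1); for i in range(len(train)): id_list += train[i]
  let id_list := train.foldl (fun acc row => acc ++ row) (List.replicate (length - 1).toNat (0 : Int))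
  mtdA_loop id_list length 0 [] []

-- ===== PORT B =====
def make_train_data_0_alt (train : List (List Int)) (length : Int) : List (List Int) × List Int :=
  let flat := train.flatMap (fun sent => sent)
  let padded := List.replicate (length - 1).toNat (0 : Int) ++ flat ++ List.replicate length.toNat (0 : Int)
  let n : Int := (padded.length : Int) - length
  let fea := (PySem.List.pyRange 0 n 1).map (fun i => PySem.List.slice padded (some i) (some (i + length)))
  let lab := PySem.List.slice padded (some length) (some (length + n))
  (fea, lab)

-- ===== PRECONDITION & SPEC =====
-- Pre_ excludes negative window lengths (outside the task's natural domain): there A's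
-- negative slice bounds and negative-index wraparound give accidental values or an IndexError.
def Pre_make_train_data_0 (train : List (List Int)) (length : Int) : Prop := 0 ≤ length
instance (train : List (List Int)) (length : Int) : Decidable (Pre_make_train_data_0 train length) := by unfold Pre_make_train_data_0; infer_instance
def pvWitness_make_train_data_0 : List (List Int) × Int := ([[1, 2], [3]], 2)

def Spec_make_train_data_0 (train : List (List Int)) (length : Int) (out : List (List Int) × List Int) : Prop := out = make_train_data_0_alt train length
instance (train : List (List Int)) (length : Int) (out : List (List Int) × List Int) : Decidable (Spec_make_train_data_0 train length out) := by unfold Spec_make_train_data_0; infer_instance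

-- ===== CLAIM (what is proved, stated in full; the proofs are below) =====
def Claim_equal_make_train_data_0 : Prop := ∀ (train : List (List Int)) (length : Int), Dom_make_train_data_0 train length → Pre_make_train_data_0 train length → Spec_make_train_data_0 train length (make_train_data_0 train length)

-- ===== LEMMAS AND PROOFS =====

-- flattening by repeated '+=' equals init ++ flatMap
theorem foldl_append_flatMap (train : List (List Int)) (init : List Int) :
    train.foldl (fun acc row => acc ++ row) init = init ++ train.flatMap (fun s => s) := by
  induction train generalizing init with
  | nil => simp
  | cons r t ih => simp [List.foldl_cons, ih, List.append_assoc]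

theorem map_range_shift {α : Type} (f : Nat → α) (i n : Nat) :
    (List.range (n+1)).map (fun k => f (i + k)) = f i :: (List.range n).map (fun k => f ((i+1) + k)) := by
  rw [List.range_succ_eq_map]
  simp [List.map_map, Function.comp]
  intro a _
  congr 1
  omega

-- A's boundary window (tail slice plus explicit zero padding) is the uniform padded window
theorem windowA_boundary (id_list : List Int) (L i : Nat) (hi : i < id_list.length) (hb : id_list.length ≤ i + L) :
    id_list.drop i ++ List.replicate (L - (id_list.length - i)) (0:Int) =
      ((id_list ++ List.replicate L (0:Int)).drop i).take L := by
  rw [List.drop_append, Nat.sub_eq_zero_of_le (Nat.le_of_lt hi), List.drop_zero, List.take_append,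
      List.take_of_length_le (l := id_list.drop i) (by simp; omega), List.take_replicate]
  have h2 : min (L - (id_list.drop i).length) L = L - (id_list.length - i) := by simp
  rw [h2]

-- A's interior window is the uniform padded window
theorem windowA_mid (id_list : List Int) (L i : Nat) (hb : i + L < id_list.length) :
    (id_list.drop i).take L = ((id_list ++ List.replicate L (0:Int)).drop i).take L := by
  rw [List.drop_append, Nat.sub_eq_zero_of_le (by omega), List.drop_zero,
      List.take_append_of_le_length (by simp; omega)]

-- A's boundary label 0 is the padded lookup
theorem labA_boundary (id_list : List Int) (L i : Nat) (hb : id_list.length ≤ i + L) :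
    (id_list ++ List.replicate L (0:Int)).getD (i + L) 0 = 0 := by
  rw [List.getD_eq_getElem?_getD, List.getElem?_append_right (by omega), List.getElem?_replicate]
  split <;> rfl

-- A's interior label is the padded lookup
theorem labA_mid (id_list : List Int) (L i : Nat) (hb : i + L < id_list.length) :
    (id_list ++ List.replicate L (0:Int)).getD (i + L) 0 = (PySem.List.pyGet? id_list ((i:Int) + (L:Int))).getD 0 := by
  have h : ((i:Int) + (L:Int)) = ((i + L : Nat) : Int) := by push_cast; ring
  rw [h, PySem.List.pyGet?_natCast, List.getD_eq_getElem?_getD, List.getElem?_append_left hb]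

-- A's loop produces, from position i on, the uniform windows/labels over the padded list
theorem mtdA_loop_spec (L : Nat) (id_list : List Int) :
    ∀ n i, i ≤ id_list.length → id_list.length - i = n → ∀ (fea : List (List Int)) (lab : List Int),
    mtdA_loop id_list (L : Int) i fea lab =
      (fea ++ (List.range n).map (fun k => ((id_list ++ List.replicate L (0:Int)).drop (i + k)).take L),
       lab ++ (List.range n).map (fun k => (id_list ++ List.replicate L (0:Int)).getD (i + k + L) 0)) := by
  intro n
  induction n with
  | zero =>
    intro i hi hn fea lab
    rw [mtdA_loop, dif_neg (by omega)]
    simp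
  | succ n ih =>
    intro i hi hn fea lab
    have hlt : i < id_list.length := by omega
    rw [mtdA_loop, dif_pos hlt]
    rw [map_range_shift (fun j => ((id_list ++ List.replicate L (0:Int)).drop j).take L) i n,
        map_range_shift (fun j => (id_list ++ List.replicate L (0:Int)).getD (j + L) 0) i n]
    by_cases hb : id_list.length ≤ i + L
    · rw [if_pos (by omega)]
      rw [ih (i+1) (by omega) (by omega)]
      rw [PySem.List.slice_from_natCast]
      have ht : ((L:Int) - ((id_list.drop i).length : Int)).toNat = L - (id_list.length - i) := by
        simp
      rw [ht, windowA_boundary id_list L i hlt hb, labA_boundary id_list L i hb]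
      simp
    · rw [if_neg (by omega)]
      rw [ih (i+1) (by omega) (by omega)]
      rw [PySem.List.slice_natCast_add id_list i L]
      rw [← windowA_mid id_list L i (by omega), ← labA_mid id_list L i (by omega)]
      simp

-- B's label slice is the map of padded lookups
theorem lab_slice_eq (padded : List Int) (L N : Nat) (h : padded.length = N + L) :
    (padded.drop L).take N = (List.range N).map (fun k => padded.getD (k + L) 0) := by
  apply List.ext_getElem
  · simp [h]
  · intro j h1 h2
    have hjN : j < N := by simp [h] at h1; omega
    simp [List.getElem_drop, List.getD_eq_getElem?_getD, List.getElem?_eq_getElem (by omega : j + L < padded.length)]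
    congr 1; omega

theorem make_train_data_0_eq (train : List (List Int)) (length : Int) (h : 0 ≤ length) :
    make_train_data_0 train length = make_train_data_0_alt train length := by
  obtain ⟨L, rfl⟩ : ∃ L : Nat, length = (L:Int) := ⟨length.toNat, (Int.toNat_of_nonneg h).symm⟩
  simp only [make_train_data_0, make_train_data_0_alt, foldl_append_flatMap, Int.toNat_natCast]
  set id_list := List.replicate ((L:Int) - 1).toNat (0:Int) ++ train.flatMap (fun s => s) with hid
  set N := id_list.length with hN
  set padded := id_list ++ List.replicate L (0:Int) with hp
  have hplen : padded.length = N + L := by simp [hp, hN]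
  have hn : (padded.length : Int) - (L:Int) = (N : Int) := by rw [hplen]; push_cast; ring
  rw [hn]
  rw [mtdA_loop_spec L id_list N 0 (Nat.zero_le _) (by simpa using hN.symm) [] []]
  have hfeaB : (PySem.List.pyRange 0 (N:Int) 1).map (fun i => PySem.List.slice padded (some i) (some (i + (L:Int)))) =
      (List.range N).map (fun k => (padded.drop (0 + k)).take L) := by
    rw [PySem.List.pyRange_zero_nat, List.map_map]
    apply List.map_congr_left
    intro k _
    simp [Function.comp, PySem.List.slice_natCast_add]
  have hlabB : PySem.List.slice padded (some (L:Int)) (some ((L:Int) + (N:Int))) =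
      (List.range N).map (fun k => padded.getD (0 + k + L) 0) := by
    rw [PySem.List.slice_natCast_add padded L N, lab_slice_eq padded L N hplen]
    simp
  rw [← hfeaB, ← hlabB]
  simp

-- ===== VERDICT (by name: the statement is the Claim_ definition above) =====
theorem make_train_data_0_spec : Claim_equal_make_train_data_0 := by
  intro train length _ hpre
  unfold Spec_make_train_data_0
  exact make_train_data_0_eq train length hpre
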